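-- pv_equiv track=rewrite | github.com/nateschmiedehaus/WeatherVane | scripts/final_ml_criteria_verification.py | check_required_criteria
-- ===== SOURCE A (Python) =====
-- from typing import List, Dict, Tuple
--
-- def is_ml_modeling_task(task_id: str, title: str) -> bool:
--     """Determine if task is an ML modeling task that needs strict criteria."""
--     if not (task_id.startswith("T12.") or task_id.startswith("T13.")):
--         return False
--
--     title_lower = title.lower()
--
--     # These are modeling tasks
--     modeling_keywords = ["train", "model", "mmm", "backtest", "elasticity", "allocation", "fit"]
--     return any(kw in title_lower for kw in modeling_keywords)
--
-- def check_required_criteria(task_id: str, title: str, exit_criteria: List[str]) -> Tuple[bool, List[str]]: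
--     """Check if task has the 3 required criteria from T-MLR-0.2."""
--
--     missing = []
--
--     # Only check modeling tasks
--     if not is_ml_modeling_task(task_id, title):
--         return True, []
--
--     # 1. Check for R² criterion
--     has_r2 = any(
--         ("r2" in str(c).lower() and ">" in str(c))
--         for c in exit_criteria
--     )
--     if not has_r2:
--         missing.append("metric:r2 > 0.50")
--
--     # 2. Check for baseline comparison criterion
--     has_baseline = any(
--         ("baseline" in str(c).lower() and ">" in str(c))
--         for c in exit_criteria
--     )
--     if not has_baseline:
--         missing.append("metric:beats_baseline > 1.10")
--
--     # 3. Check for modeling_reality_v2 critic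
--     has_critic = "critic:modeling_reality_v2" in exit_criteria
--     if not has_critic:
--         missing.append("critic:modeling_reality_v2")
--
--     return len(missing) == 0, missing
-- ===== SOURCE B (Python) =====
-- from typing import List, Tuple
--
-- def is_ml_modeling_task(task_id: str, title: str) -> bool:
--     if not (task_id.startswith("T12.") or task_id.startswith("T13.")):
--         return False
--     title_lower = title.lower()
--     modeling_keywords = ["train", "model", "mmm", "backtest", "elasticity", "allocation", "fit"]
--     return any(kw in title_lower for kw in modeling_keywords)
--
-- def check_required_criteria(task_id: str, title: str, exit_criteria: List[str]) -> Tuple[bool, List[str]]: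
--     if not is_ml_modeling_task(task_id, title):
--         return True, []
--     has_r2 = has_baseline = has_critic = False
--     for c in exit_criteria:
--         s = str(c)
--         low = s.lower()
--         if "r2" in low and ">" in s:
--             has_r2 = True
--         if "baseline" in low and ">" in s:
--             has_baseline = True
--         if s == "critic:modeling_reality_v2":
--             has_critic = True
--     missing = [msg for ok, msg in ((has_r2, "metric:r2 > 0.50"),
--                                    (has_baseline, "metric:beats_baseline > 1.10"),
--                                    (has_critic, "critic:modeling_reality_v2")) if not ok]
--     return not missing, missing
-- ===== Notes on version B (the rewrite author's own statement) =====
-- stated objective: alternative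
-- what changed: Replaces A's three separate any()-scans over exit_criteria (plus a membership scan) by a single pass that accumulates the three flags per element, then builds the missing list from a fixed table.
import Mathlib
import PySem

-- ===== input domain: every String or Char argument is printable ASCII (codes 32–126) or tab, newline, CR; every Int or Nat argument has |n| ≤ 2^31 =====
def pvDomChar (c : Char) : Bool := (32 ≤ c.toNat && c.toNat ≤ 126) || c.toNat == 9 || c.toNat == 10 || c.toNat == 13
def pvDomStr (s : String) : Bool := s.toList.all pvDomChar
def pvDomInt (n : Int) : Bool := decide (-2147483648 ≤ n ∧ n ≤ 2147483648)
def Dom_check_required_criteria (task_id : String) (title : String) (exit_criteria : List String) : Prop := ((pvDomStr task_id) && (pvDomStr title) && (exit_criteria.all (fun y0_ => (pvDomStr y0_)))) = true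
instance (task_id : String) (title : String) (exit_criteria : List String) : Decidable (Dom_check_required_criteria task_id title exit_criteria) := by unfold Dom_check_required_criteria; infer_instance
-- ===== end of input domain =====

-- B replaces A's three separate any() scans (plus a membership scan) over exit_criteria
-- with one fold accumulating the three flags, then builds missing from a fixed table.
-- ===== PORT A =====
def is_ml_modeling_task (task_id : String) (title : String) : Bool :=
  if !(PySem.Str.startswith task_id "T12." || PySem.Str.startswith task_id "T13.") then false
  else
    let title_lower := PySem.Str.lower title
    ["train", "model", "mmm", "backtest", "elasticity", "allocation", "fit"].any
      (fun kw => PySem.Str.isIn kw title_lower)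

def check_required_criteria (task_id : String) (title : String) (exit_criteria : List String) : Bool × List String :=
  let missing : List String := []
  if !is_ml_modeling_task task_id title then (true, [])
  else
    let has_r2 := exit_criteria.any
      (fun c => PySem.Str.isIn "r2" (PySem.Str.lower c) && PySem.Str.isIn ">" c)
    let missing := if !has_r2 then missing ++ ["metric:r2 > 0.50"] else missing
    let has_baseline := exit_criteria.any
      (fun c => PySem.Str.isIn "baseline" (PySem.Str.lower c) && PySem.Str.isIn ">" c)
    let missing := if !has_baseline then missing ++ ["metric:beats_baseline > 1.10"] else missing
    let has_critic := exit_criteria.contains "critic:modeling_reality_v2"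
    let missing := if !has_critic then missing ++ ["critic:modeling_reality_v2"] else missing
    (missing.length == 0, missing)

-- ===== PORT B =====
def is_ml_modeling_task_alt (task_id : String) (title : String) : Bool :=
  if !(PySem.Str.startswith task_id "T12." || PySem.Str.startswith task_id "T13.") then false
  else
    let title_lower := PySem.Str.lower title
    ["train", "model", "mmm", "backtest", "elasticity", "allocation", "fit"].any
      (fun kw => PySem.Str.isIn kw title_lower)

def check_required_criteria_alt (task_id : String) (title : String) (exit_criteria : List String) : Bool × List String :=
  if !is_ml_modeling_task_alt task_id title then (true, [])
  else
    let flags := exit_criteria.foldl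
      (fun (f : Bool × Bool × Bool) (c : String) =>
        let low := PySem.Str.lower c
        (f.1 || (PySem.Str.isIn "r2" low && PySem.Str.isIn ">" c),
         f.2.1 || (PySem.Str.isIn "baseline" low && PySem.Str.isIn ">" c),
         f.2.2 || (c == "critic:modeling_reality_v2")))
      (false, false, false)
    let missing := [(flags.1, "metric:r2 > 0.50"),
                    (flags.2.1, "metric:beats_baseline > 1.10"),
                    (flags.2.2, "critic:modeling_reality_v2")].filterMap
      (fun p => if p.1 then none else some p.2)
    (missing.isEmpty, missing)

-- ===== PRECONDITION & SPEC =====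
def Spec_check_required_criteria (task_id : String) (title : String) (exit_criteria : List String) (out : Bool × List String) : Prop := out = check_required_criteria_alt task_id title exit_criteria
instance (task_id : String) (title : String) (exit_criteria : List String) (out : Bool × List String) : Decidable (Spec_check_required_criteria task_id title exit_criteria out) := by unfold Spec_check_required_criteria; infer_instance

-- ===== CLAIM (what is proved, stated in full; the proofs are below) =====
def Claim_equal_check_required_criteria : Prop := ∀ (task_id : String) (title : String) (exit_criteria : List String), Dom_check_required_criteria task_id title exit_criteria → Spec_check_required_criteria task_id title exit_criteria (check_required_criteria task_id title exit_criteria)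

-- ===== LEMMAS AND PROOFS =====

-- ===== VERDICT (by name: the statement is the Claim_ definition above) =====
theorem any_eq_contains_critic (l : List String) :
    (l.any fun x => x == "critic:modeling_reality_v2") = l.contains "critic:modeling_reality_v2" := by
  induction l with
  | nil => rfl
  | cons h t ih =>
    rcases eq_or_ne h "critic:modeling_reality_v2" with hx | hx
    · simp [List.any_cons, ih, hx]
    · simp [List.any_cons, ih, hx, Ne.symm hx]

theorem flags_fold (l : List String) (a b c : Bool) :
    l.foldl (fun (f : Bool × Bool × Bool) (x : String) =>
        let low := PySem.Str.lower x
        (f.1 || (PySem.Str.isIn "r2" low && PySem.Str.isIn ">" x),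
         f.2.1 || (PySem.Str.isIn "baseline" low && PySem.Str.isIn ">" x),
         f.2.2 || (x == "critic:modeling_reality_v2"))) (a, b, c)
    = (a || l.any (fun x => PySem.Str.isIn "r2" (PySem.Str.lower x) && PySem.Str.isIn ">" x),
       b || l.any (fun x => PySem.Str.isIn "baseline" (PySem.Str.lower x) && PySem.Str.isIn ">" x),
       c || l.any (fun x => x == "critic:modeling_reality_v2")) := by
  induction l generalizing a b c with
  | nil => simp
  | cons h t ih => rw [List.foldl_cons, ih]; simp [Bool.or_assoc]

theorem check_required_criteria_spec : Claim_equal_check_required_criteria := by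
  intro task_id title exit_criteria _
  unfold Spec_check_required_criteria check_required_criteria check_required_criteria_alt
  have hg : is_ml_modeling_task_alt task_id title = is_ml_modeling_task task_id title := rfl
  rw [hg]
  cases hml : is_ml_modeling_task task_id title with
  | false => simp
  | true =>
    rw [flags_fold]
    have hc : exit_criteria.any (fun x => x == "critic:modeling_reality_v2")
        = exit_criteria.contains "critic:modeling_reality_v2" :=
      any_eq_contains_critic exit_criteria
    rw [hc]
    cases hr : exit_criteria.any (fun x => PySem.Str.isIn "r2" (PySem.Str.lower x) && PySem.Str.isIn ">" x) <;>
    cases hb : exit_criteria.any (fun x => PySem.Str.isIn "baseline" (PySem.Str.lower x) && PySem.Str.isIn ">" x) <;>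
    cases hcr : exit_criteria.contains "critic:modeling_reality_v2" <;>
      simp [List.filterMap]
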